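-- pv_equiv track=rewrite | github.com/goSTYLO/My-Crew-Manager | LLMs/parser.py | parse_roles
-- ===== SOURCE A (Python) =====
-- def parse_roles(raw: str) -> list:
--     lines = raw.strip().splitlines()
--     roles = []
--     current = {}
--     for line in lines:
--         line = line.strip()
--         if line.startswith("- "):
--             if current:
--                 roles.append(current)
--             current = {"title": line[2:].strip()}
--         elif line.startswith("description:"):
--             current["description"] = line.split(":", 1)[1].strip()
--     if current:
--         roles.append(current)
--     return roles
-- ===== SOURCE B (Python) =====
-- def _role_of(group):
--     d = {}
--     if group and group[0].startswith("- "):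
--         d["title"] = group[0][2:].strip()
--     desc = None
--     for ln in group:
--         if ln.startswith("description:"):
--             desc = ln.split(":", 1)[1].strip()
--     if desc is not None:
--         d["description"] = desc
--     return d
--
--
-- def parse_roles(raw: str) -> list:
--     lines = [ln.strip() for ln in raw.strip().splitlines()]
--     groups = []
--     cur = []
--     for ln in lines:
--         if ln.startswith("- "):
--             groups.append(cur)
--             cur = [ln]
--         else:
--             cur.append(ln)
--     groups.append(cur)
--     return [d for d in map(_role_of, groups) if d]
-- ===== Notes on version B (the rewrite author's own statement) =====
-- stated objective: alternative
-- what changed: B replaces A's single stateful loop (which carries a mutable current-role dict and flushes it whenever a header line appears) by a two-phase decomposition: first partition the stripped lines into groups at each dash-prefixed header line, then map each group independently to its role dict (title from the group's header, description from the group's last description line) and keep the non-empty dicts.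
import Mathlib
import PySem

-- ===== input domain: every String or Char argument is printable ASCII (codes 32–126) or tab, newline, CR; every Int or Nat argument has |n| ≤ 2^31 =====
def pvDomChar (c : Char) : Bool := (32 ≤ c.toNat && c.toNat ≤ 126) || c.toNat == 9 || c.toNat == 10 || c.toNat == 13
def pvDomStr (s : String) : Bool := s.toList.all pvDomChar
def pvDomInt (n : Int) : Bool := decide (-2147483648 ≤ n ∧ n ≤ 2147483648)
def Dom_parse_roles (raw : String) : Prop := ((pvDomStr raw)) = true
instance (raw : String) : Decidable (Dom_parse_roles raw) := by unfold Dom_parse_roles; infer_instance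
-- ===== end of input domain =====

-- B re-implements the parse as group-then-map (partition lines into header-led groups, then build each
-- role dict in a second pass); same return value as A, objective: alternative decomposition (not faster).

-- ===== PORT A =====
-- shared subexpressions of both Pythons: ln.split(":", 1)[1].strip() and ln[2:].strip()
def pvVal (ln : String) : String :=
  PySem.Str.strip (((PySem.Str.splitMax? ln ":" 1).getD []).getD 1 "")

def pvTitle (ln : String) : String :=
  PySem.Str.strip (PySem.Str.slice ln (some 2))

-- the body of A's loop after 'line = line.strip()'
def pvACore (st : List (List (String × String)) × PySem.Dict String String) (line : String) :
    List (List (String × String)) × PySem.Dict String String :=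
  if PySem.Str.startswith line "- " then
    ((if st.2.items.isEmpty then st.1 else st.1 ++ [st.2.items]),
     PySem.Dict.ofList [("title", pvTitle line)])
  else if PySem.Str.startswith line "description:" then
    (st.1, st.2.insert "description" (pvVal line))
  else st

-- one iteration of A's loop: 'line = line.strip()' then the branch
def pvAStep (st : List (List (String × String)) × PySem.Dict String String) (line : String) :
    List (List (String × String)) × PySem.Dict String String :=
  pvACore st (PySem.Str.strip line)

def parse_roles (raw : String) : List (List (String × String)) :=
  let lines := PySem.Str.splitlines (PySem.Str.strip raw)
  let st := lines.foldl pvAStep ([], PySem.Dict.empty)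
  if st.2.items.isEmpty then st.1 else st.1 ++ [st.2.items]

-- ===== PORT B =====
-- _role_of: build one role dict from the lines of one group
def pvRoleOf (group : List String) : List (String × String) :=
  let d : PySem.Dict String String :=
    match group with
    | [] => PySem.Dict.empty
    | h :: _ =>
      if PySem.Str.startswith h "- " then (PySem.Dict.empty).insert "title" (pvTitle h)
      else PySem.Dict.empty
  let desc : Option String := group.foldl
    (fun acc ln => if PySem.Str.startswith ln "description:" then some (pvVal ln) else acc) none
  (match desc with
   | some v => d.insert "description" v
   | none => d).items

-- one iteration of B's grouping loop
def pvGStep (st : List (List String) × List String) (ln : String) : List (List String) × List String :=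
  if PySem.Str.startswith ln "- " then (st.1 ++ [st.2], [ln]) else (st.1, st.2 ++ [ln])

def parse_roles_alt (raw : String) : List (List (String × String)) :=
  let lines := (PySem.Str.splitlines (PySem.Str.strip raw)).map PySem.Str.strip
  let st := lines.foldl pvGStep ([], [])
  ((st.1 ++ [st.2]).map pvRoleOf).filter (fun d => !d.isEmpty)

-- ===== PRECONDITION & SPEC =====
def Spec_parse_roles (raw : String) (out : List (List (String × String))) : Prop := out = parse_roles_alt raw
instance (raw : String) (out : List (List (String × String))) : Decidable (Spec_parse_roles raw out) := by unfold Spec_parse_roles; infer_instance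

-- ===== CLAIM (what is proved, stated in full; the proofs are below) =====
def Claim_equal_parse_roles : Prop := ∀ (raw : String), Dom_parse_roles raw → Spec_parse_roles raw (parse_roles raw)

-- ===== LEMMAS AND PROOFS =====

-- 'if current: roles.append(current); return roles' finish of A, as a function of the loop state
def pvFin (st : List (List (String × String)) × PySem.Dict String String) : List (List (String × String)) :=
  if st.2.items.isEmpty then st.1 else st.1 ++ [st.2.items]

-- the title component of a group (ghost function for the proof)
def pvTOf (g : List String) : Option String :=
  match g with
  | [] => none
  | h :: _ => if PySem.Str.startswith h "- " then some (pvTitle h) else none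

-- the last-description component of a group (ghost)
def pvDOf (g : List String) : Option String :=
  g.foldl (fun acc ln => if PySem.Str.startswith ln "description:" then some (pvVal ln) else acc) none

def pvTP : Option String → List (String × String)
  | none => []
  | some s => [("title", s)]

def pvDP : Option String → List (String × String)
  | none => []
  | some s => [("description", s)]

lemma pv_ns (l : String) (h : PySem.Str.startswith l "- " = true) :
    PySem.Str.startswith l "description:" = false := by
  by_contra hc
  rw [Bool.not_eq_false] at hc
  rw [PySem.Str.startswith_eq, PySem.Chars.startswith_iff] at h hc
  rcases h with ⟨t1, h1⟩
  rcases hc with ⟨t2, h2⟩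
  rw [← h1] at h2
  simp at h2

lemma pv_insert_desc (t d0 : Option String) (v : String) :
    (PySem.Dict.mk (pvTP t ++ pvDP d0)).insert "description" v
      = PySem.Dict.mk (pvTP t ++ [("description", v)]) := by
  cases t <;> cases d0 <;>
    simp [pvTP, pvDP, PySem.Dict.insert, PySem.Dict.contains, PySem.Dict.keys, PySem.Dict.items]

lemma pvRoleOf_eq (g : List String) : pvRoleOf g = pvTP (pvTOf g) ++ pvDP (pvDOf g) := by
  cases g with
  | nil => rfl
  | cons h tl =>
    rcases hfold : pvDOf (h :: tl) with _ | v <;>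
      simp only [pvDOf] at hfold <;>
      cases hb : PySem.Str.startswith h "- " <;>
        (simp only [pvRoleOf, pvTOf, pvDOf]; rw [hfold];
         simp [show PySem.Chars.startswith h.toList ['-', ' '] = _ from hb, pvTP, pvDP,
           PySem.Dict.insert, PySem.Dict.contains, PySem.Dict.keys, PySem.Dict.empty,
           PySem.Dict.items])

lemma pvDOf_append (g : List String) (l : String) :
    pvDOf (g ++ [l]) =
      if PySem.Str.startswith l "description:" then some (pvVal l) else pvDOf g := by
  simp [pvDOf, List.foldl_append]

lemma pvTOf_append (g : List String) (l : String) (h : PySem.Str.startswith l "- " = false) :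
    pvTOf (g ++ [l]) = pvTOf g := by
  cases g with
  | nil =>
    have h2 : PySem.Chars.startswith l.toList ['-', ' '] = false := h
    simp [pvTOf, h2]
  | cons a tl => rfl

lemma pvRoleOf_single_title (l : String) (h : PySem.Str.startswith l "- " = true) :
    pvRoleOf [l] = [("title", pvTitle l)] := by
  rw [pvRoleOf_eq]
  have h2 : PySem.Chars.startswith l.toList ['-', ' '] = true := h
  have h3 : PySem.Chars.startswith l.toList
      ['d', 'e', 's', 'c', 'r', 'i', 'p', 't', 'i', 'o', 'n', ':'] = false := pv_ns l h
  simp [pvTOf, pvDOf, pvTP, pvDP, h2, h3]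

lemma pvFin_acc (ls : List String) (rs : List (List (String × String)))
    (c : PySem.Dict String String) :
    pvFin (ls.foldl pvACore (rs, c)) = rs ++ pvFin (ls.foldl pvACore ([], c)) := by
  induction ls generalizing rs c with
  | nil =>
    simp only [List.foldl_nil, pvFin]
    split <;> simp
  | cons l ls ih =>
    simp only [List.foldl_cons]
    cases hb : PySem.Str.startswith l "- " with
    | true =>
      simp only [pvACore, hb, if_pos, List.nil_append]
      by_cases he : c.items.isEmpty = true
      · simp only [he, if_pos]
        exact ih _ _
      · simp only [if_neg he]
        rw [ih (rs ++ [c.items]), ih ([c.items])]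
        simp [List.append_assoc]
    | false =>
      cases hd : PySem.Str.startswith l "description:" with
      | true =>
        simp only [pvACore, hb, hd, Bool.false_eq_true, if_neg, if_pos, not_false_iff]
        exact ih _ _
      | false =>
        simp only [pvACore, hb, hd, Bool.false_eq_true, if_neg, not_false_iff]
        exact ih _ _

lemma pvGStep_acc (ls : List String) (gs : List (List String)) (g : List String) :
    ls.foldl pvGStep (gs, g)
      = (gs ++ (ls.foldl pvGStep ([], g)).1, (ls.foldl pvGStep ([], g)).2) := by
  induction ls generalizing gs g with
  | nil => simp
  | cons l ls ih =>
    simp only [List.foldl_cons]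
    cases hb : PySem.Str.startswith l "- " with
    | true =>
      simp only [pvGStep, hb, if_pos, List.nil_append]
      rw [ih (gs ++ [g]), ih ([g])]
      simp [List.append_assoc]
    | false =>
      simp only [pvGStep, hb, Bool.false_eq_true, if_neg, not_false_iff]
      exact ih _ _

lemma pv_key (ls : List String) (g : List String) :
    pvFin (ls.foldl pvACore ([], PySem.Dict.mk (pvRoleOf g)))
      = (((ls.foldl pvGStep ([], g)).1 ++ [(ls.foldl pvGStep ([], g)).2]).map pvRoleOf).filter
          (fun d => !d.isEmpty) := by
  induction ls generalizing g with
  | nil =>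
    simp only [List.foldl_nil, pvFin]
    by_cases he : (pvRoleOf g).isEmpty = true
    · simp [he]
    · simp [he]
  | cons l ls ih =>
    simp only [List.foldl_cons]
    cases hb : PySem.Str.startswith l "- " with
    | true =>
      have hof : PySem.Dict.ofList [("title", pvTitle l)] = PySem.Dict.mk (pvRoleOf [l]) := by
        rw [pvRoleOf_single_title l hb]
        simp [PySem.Dict.ofList, PySem.Dict.update, PySem.Dict.insert, PySem.Dict.contains,
          PySem.Dict.keys, PySem.Dict.empty, PySem.Dict.items]
      simp only [pvACore, pvGStep, hb, if_pos, hof, List.nil_append]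
      rw [pvFin_acc, ih [l], pvGStep_acc ls [g] [l]]
      by_cases he : (pvRoleOf g).isEmpty = true
      · simp [he]
      · simp [he]
    | false =>
      cases hd : PySem.Str.startswith l "description:" with
      | true =>
        have hins : (PySem.Dict.mk (pvRoleOf g)).insert "description" (pvVal l)
            = PySem.Dict.mk (pvRoleOf (g ++ [l])) := by
          rw [pvRoleOf_eq g, pv_insert_desc, pvRoleOf_eq (g ++ [l]), pvTOf_append g l hb,
            pvDOf_append]
          simp [show PySem.Chars.startswith l.toList
            ['d', 'e', 's', 'c', 'r', 'i', 'p', 't', 'i', 'o', 'n', ':'] = true from hd, pvDP]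
        simp only [pvACore, pvGStep, hb, hd, Bool.false_eq_true, if_neg, if_pos, not_false_iff,
          hins]
        exact ih _
      | false =>
        have hro : pvRoleOf (g ++ [l]) = pvRoleOf g := by
          rw [pvRoleOf_eq g, pvRoleOf_eq (g ++ [l]), pvTOf_append g l hb, pvDOf_append]
          simp [show PySem.Chars.startswith l.toList ['d', 'e', 's', 'c', 'r', 'i', 'p', 't', 'i', 'o', 'n', ':'] = false from hd]
        have ih' := ih (g ++ [l])
        rw [hro] at ih'
        simp only [pvACore, pvGStep, hb, hd, Bool.false_eq_true, if_neg, not_false_iff]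
        exact ih'

-- ===== VERDICT (by name: the statement is the Claim_ definition above) =====
theorem parse_roles_spec : Claim_equal_parse_roles := by
  intro raw _
  show parse_roles raw = parse_roles_alt raw
  calc parse_roles raw
      = pvFin ((PySem.Str.splitlines (PySem.Str.strip raw)).foldl pvAStep
          ([], PySem.Dict.empty)) := rfl
    _ = pvFin (((PySem.Str.splitlines (PySem.Str.strip raw)).map PySem.Str.strip).foldl pvACore
          ([], PySem.Dict.empty)) := by rw [List.foldl_map]; rfl
    _ = parse_roles_alt raw := by
          have h := pv_key ((PySem.Str.splitlines (PySem.Str.strip raw)).map PySem.Str.strip) []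
          exact h
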